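-- pv_equiv track=rewrite | github.com/yura103/algorithm-journey | 프로그래머스/2/468379. 선인장 숨기기/선인장 숨기기.py | solution
-- ===== SOURCE A (Python) =====
-- from collections import deque
--
-- def solution(m, n, h, w, drops):
--     INF = len(drops) + 1
--
--     rain = [[INF] * n for _ in range(m)]
--
--     for t, (r, c) in enumerate(drops, start=1):
--         rain[r][c] = t
--
--     row_min = [[0] * (n - w + 1) for _ in range(m)]
--
--     for r in range(m):
--         dq = deque()
--
--         for c in range(n):
--             while dq and rain[r][dq[-1]] > rain[r][c]:
--                 dq.pop()
--
--             dq.append(c)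
--
--             if dq[0] <= c - w:
--                 dq.popleft()
--
--             if c >= w - 1:
--                 row_min[r][c - w + 1] = rain[r][dq[0]]
--
--     area_min = [[0] * (n - w + 1) for _ in range(m - h + 1)]
--
--     for c in range(n - w + 1):
--         dq = deque()
--
--         for r in range(m):
--             while dq and row_min[dq[-1]][c] > row_min[r][c]:
--                 dq.pop()
--
--             dq.append(r)
--
--             if dq[0] <= r - h:
--                 dq.popleft()
--
--             if r >= h - 1:
--                 top = r - h + 1
--                 area_min[top][c] = row_min[dq[0]][c]
--
--     best = -1
--     answer = [0, 0]
--
--     for r in range(m - h + 1):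
--         for c in range(n - w + 1):
--             if area_min[r][c] > best:
--                 best = area_min[r][c]
--                 answer = [r, c]
--
--     return answer
-- ===== SOURCE B (Python) =====
-- def solution(m, n, h, w, drops):
--     INF = len(drops) + 1
--
--     rain = [[INF] * n for _ in range(m)]
--
--     for t, (r, c) in enumerate(drops, start=1):
--         rain[r][c] = t
--
--     best = -1
--     answer = [0, 0]
--
--     for r in range(m - h + 1):
--         for c in range(n - w + 1):
--             v = rain[r][c]
--             for i in range(r, r + h):
--                 for j in range(c, c + w):
--                     if rain[i][j] < v:
--                         v = rain[i][j]
--             if v > best: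
--                 best = v
--                 answer = [r, c]
--
--     return answer
-- ===== Notes on version B (the rewrite author's own statement) =====
-- stated objective: simpler
-- what changed: Replaces the two monotonic-deque sliding-window-minimum passes (row pass, then column pass) by a direct brute-force scan that recomputes each h×w window's minimum with two inner loops over the block.
-- outside the precondition, e.g. on solution(0, 1, 0, 1, []): A returns [0, 0], B raises IndexError; on solution(1, 0, 1, 0, []): A returns [0, 0], B raises IndexError
import Mathlib
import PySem

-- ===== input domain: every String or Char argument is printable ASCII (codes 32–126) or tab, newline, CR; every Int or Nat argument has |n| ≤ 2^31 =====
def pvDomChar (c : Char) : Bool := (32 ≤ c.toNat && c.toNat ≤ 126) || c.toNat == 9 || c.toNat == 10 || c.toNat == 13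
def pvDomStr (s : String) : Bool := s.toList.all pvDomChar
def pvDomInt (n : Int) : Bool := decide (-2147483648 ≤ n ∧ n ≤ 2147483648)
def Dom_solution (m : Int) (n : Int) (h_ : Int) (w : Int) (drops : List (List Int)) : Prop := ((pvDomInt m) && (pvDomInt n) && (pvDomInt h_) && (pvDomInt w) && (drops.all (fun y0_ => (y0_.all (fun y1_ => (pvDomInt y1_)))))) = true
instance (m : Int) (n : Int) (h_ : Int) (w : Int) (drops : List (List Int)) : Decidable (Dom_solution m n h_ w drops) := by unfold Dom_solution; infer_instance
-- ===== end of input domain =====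

-- B replaces A's two monotonic-deque sliding-minimum passes by a plain brute-force scan of every
-- h×w window (simpler, not faster); equal answers are proved on Pre_ (positive window sizes,
-- well-formed in-range drops).


-- ===== PORT A =====
-- helpers shared by BOTH ports (the grid-building lines are identical in the two Pythons):
-- g[i][j] read / 'g[i][j] = v' write, with Python's negative-index wraparound; out of range the
-- write is a no-op and the read a default (Python raises there; Pre_ excludes such inputs).
def gget (g : List (List Int)) (i j : Int) : Int :=
  PySem.List.pyGetD (PySem.List.pyGetD g i []) j 0
def set2 (g : List (List Int)) (i j v : Int) : List (List Int) :=
  PySem.List.pySetD g i (PySem.List.pySetD (PySem.List.pyGetD g i []) j v)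
-- rain = [[INF]*n for _ in range(m)]; for t,(r,c) in enumerate(drops, start=1): rain[r][c] = t
def buildRain (m : Int) (n : Int) (drops : List (List Int)) : List (List Int) :=
  let INF : Int := PySem.List.len drops + 1
  (PySem.List.enumerate drops 1).foldl (fun g td =>
      match td.2 with
      | [r, c] => set2 g r c td.1
      | _ => g)   -- a drop that is not a pair makes Python raise; Pre_ excludes it
    ((PySem.List.pyRange 0 m 1).map (fun _ => PySem.List.pyRepeat [INF] n))

-- while dq and f(dq[-1]) > f(c): dq.pop()
def popBack (p : Int → Bool) (dq : List Int) : List Int :=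
  if hne : dq = [] then dq
  else if p (PySem.List.pyGetD dq (-1) 0) then popBack p dq.dropLast else dq
termination_by dq.length
decreasing_by
  simp only [List.length_dropLast]
  exact Nat.sub_lt (List.length_pos_iff.mpr hne) one_pos

-- one iteration of A's inner deque loop (f = the line being scanned, w = window width)
def dqStep (f : Int → Int) (w : Int) (st : List Int × List Int) (c : Int) : List Int × List Int :=
  let dq := popBack (fun i => decide (f i > f c)) st.1
  let dq := dq ++ [c]
  let dq := if PySem.List.pyGetD dq 0 0 ≤ c - w then dq.tail else dq
  let out := if c ≥ w - 1 then PySem.List.pySetD st.2 (c - w + 1) (f (PySem.List.pyGetD dq 0 0)) else st.2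
  (dq, out)

-- one full line scan: out[k] = min f over [k, k+w) for each window start k
def dqPass (f : Int → Int) (w : Int) (N : Int) : List Int :=
  ((PySem.List.pyRange 0 N 1).foldl (dqStep f w) ([], PySem.List.pyRepeat [(0:Int)] (N - w + 1))).2

def solution (m : Int) (n : Int) (h_ : Int) (w : Int) (drops : List (List Int)) : List Int :=
  let rain := buildRain m n drops
  let rowMin := (PySem.List.pyRange 0 m 1).map (fun r => dqPass (fun c => gget rain r c) w n)
  -- area_min is kept as the list of its COLUMNS (the order the Python loop fills it);
  -- the read below transposes accordingly (same cells, same values)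
  let areaCols := (PySem.List.pyRange 0 (n - w + 1) 1).map (fun c => dqPass (fun r => gget rowMin r c) h_ m)
  ((PySem.List.pyRange 0 (m - h_ + 1) 1).foldl (fun st r =>
      (PySem.List.pyRange 0 (n - w + 1) 1).foldl (fun (st : Int × List Int) c =>
        if gget areaCols c r > st.1 then (gget areaCols c r, [r, c]) else st) st)
    ((-1 : Int), ([0, 0] : List Int))).2

-- ===== PORT B =====
def solution_alt (m : Int) (n : Int) (h_ : Int) (w : Int) (drops : List (List Int)) : List Int :=
  let rain := buildRain m n drops
  ((PySem.List.pyRange 0 (m - h_ + 1) 1).foldl (fun st r =>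
      (PySem.List.pyRange 0 (n - w + 1) 1).foldl (fun (st : Int × List Int) c =>
        let v := (PySem.List.pyRange r (r + h_) 1).foldl (fun v i =>
            (PySem.List.pyRange c (c + w) 1).foldl (fun v j =>
              if gget rain i j < v then gget rain i j else v) v) (gget rain r c)
        if v > st.1 then (v, [r, c]) else st) st)
    ((-1 : Int), ([0, 0] : List Int))).2

-- ===== PRECONDITION & SPEC =====
-- Pre_ excludes exactly the inputs on which A raises (a drop that is not a pair, a drop coordinate
-- outside Python's list-index range, a non-positive window size reaching a deque read), plus the
-- remaining non-positive-window corners where A's empty scan still returns [0,0] but B raises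
-- (e.g. m=0, h_=0): those [0,0] returns are a degenerate artefact of A's zero-filled grids.
def Pre_solution (m : Int) (n : Int) (h_ : Int) (w : Int) (drops : List (List Int)) : Prop :=
  (∀ d ∈ drops, d.length = 2 ∧
    -m ≤ PySem.List.pyGetD d 0 0 ∧ PySem.List.pyGetD d 0 0 < m ∧
    -n ≤ PySem.List.pyGetD d 1 0 ∧ PySem.List.pyGetD d 1 0 < n) ∧
  ¬(w ≤ 0 ∧ 1 ≤ n ∧ 1 ≤ m) ∧ ¬(h_ ≤ 0 ∧ 1 ≤ m ∧ 1 ≤ n - w + 1) ∧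
  ((1 ≤ h_ ∧ 1 ≤ w) ∨ m - h_ + 1 ≤ 0 ∨ n - w + 1 ≤ 0)
instance (m : Int) (n : Int) (h_ : Int) (w : Int) (drops : List (List Int)) : Decidable (Pre_solution m n h_ w drops) := by unfold Pre_solution; infer_instance

def pvWitness_solution : Int × Int × Int × Int × List (List Int) := (3, 2, 2, 1, [[0, 1], [2, 0], [1, 1]])

def Spec_solution (m : Int) (n : Int) (h_ : Int) (w : Int) (drops : List (List Int)) (out : List Int) : Prop := out = solution_alt m n h_ w drops
instance (m : Int) (n : Int) (h_ : Int) (w : Int) (drops : List (List Int)) (out : List Int) : Decidable (Spec_solution m n h_ w drops out) := by unfold Spec_solution; infer_instance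

-- ===== CLAIM (what is proved, stated in full; the proofs are below) =====
def Claim_equal_solution : Prop := ∀ (m : Int) (n : Int) (h_ : Int) (w : Int) (drops : List (List Int)), Dom_solution m n h_ w drops → Pre_solution m n h_ w drops → Spec_solution m n h_ w drops (solution m n h_ w drops)

-- ===== LEMMAS AND PROOFS =====
-- min of f over the window [a, a+len) (len ≥ 1), as a fold
def winMin (f : Int → Int) (a : Int) (len : Int) : Int :=
  ((PySem.List.pyRange a (a + len) 1).map f).foldl min (f a)

theorem winMin_le (f : Int → Int) (a len i : Int) (h1 : a ≤ i) (h2 : i < a + len) :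
    winMin f a len ≤ f i := by
  exact (PySem.List.foldl_min_le _ _).2 _ (List.mem_map.mpr ⟨i, PySem.List.mem_pyRange_one.mpr ⟨h1, h2⟩, rfl⟩)

theorem winMin_attained (f : Int → Int) (a len : Int) :
    winMin f a len = f a ∨ ∃ i, a ≤ i ∧ i < a + len ∧ winMin f a len = f i := by
  rcases PySem.List.foldl_min_mem ((PySem.List.pyRange a (a + len) 1).map f) (f a) with h | h
  · exact Or.inl h
  · rcases List.mem_map.mp h with ⟨i, hi, he⟩
    rcases PySem.List.mem_pyRange_one.mp hi with ⟨h1, h2⟩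
    exact Or.inr ⟨i, h1, h2, he.symm⟩

theorem le_winMin (f : Int → Int) (a len v : Int) (hlen : 1 ≤ len)
    (h : ∀ i, a ≤ i → i < a + len → v ≤ f i) : v ≤ winMin f a len := by
  rcases winMin_attained f a len with he | ⟨i, h1, h2, he⟩
  · rw [he]; exact h a le_rfl (by omega)
  · rw [he]; exact h i h1 h2

theorem winMin_congr (f g : Int → Int) (a len : Int) (hlen : 1 ≤ len)
    (h : ∀ i, a ≤ i → i < a + len → f i = g i) : winMin f a len = winMin g a len := by
  unfold winMin
  rw [h a le_rfl (by omega), List.map_congr_left]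
  intro i hi
  rcases PySem.List.mem_pyRange_one.mp hi with ⟨h1, h2⟩
  exact h i h1 h2

-- the deque-loop invariant: after processing indices [0, c), the deque is sorted and holds exactly
-- the indices of the current window whose value is ≤ every later value, and out already holds the
-- window minima for all completed windows
def DqInv (f : Int → Int) (w N c : Int) (st : List Int × List Int) : Prop :=
  st.1.Pairwise (· < ·) ∧
  (∀ i : Int, i ∈ st.1 ↔ (c - w ≤ i ∧ 0 ≤ i ∧ i < c ∧ ∀ j : Int, i < j → j < c → f i ≤ f j)) ∧
  st.2.length = (N - w + 1).toNat ∧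
  (∀ k : Int, 0 ≤ k → k ≤ c - w → PySem.List.pyGetD st.2 k 0 = winMin f k w)

theorem popBack_filter (f : Int → Int) (v : Int) (l : List Int)
    (h : l.Pairwise (fun a b => f a ≤ f b)) :
    popBack (fun i => decide (f i > v)) l = l.filter (fun i => decide (f i ≤ v)) := by
  induction l using List.reverseRecOn with
  | nil => simp [popBack]
  | append_singleton t x ih =>
    have hne : t ++ [x] ≠ [] := by simp
    rw [popBack, dif_neg hne, PySem.List.pyGetD_neg_one_append_singleton]
    rcases List.pairwise_append.mp h with ⟨ht, -, hcross⟩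
    by_cases hx : f x > v
    · simp only [hx, decide_true, if_true, List.dropLast_concat, ih ht, List.filter_append]
      simp [not_le.mpr hx]
    · have hxle : f x ≤ v := not_lt.mp hx
      simp only [hx, decide_false, Bool.false_eq_true, if_false, List.filter_append]
      rw [List.filter_eq_self.mpr (fun a ha => by
            simp only [decide_eq_true_eq]
            exact le_trans (hcross a ha x (List.mem_singleton_self x)) hxle),
          List.filter_eq_self.mpr (fun a ha => by
            simp only [List.mem_singleton] at ha
            subst ha
            simp [hxle])]

theorem pyGetD_pySetD_int (xs : List Int) (i k v d : Int) (hi0 : 0 ≤ i)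
    (hk0 : 0 ≤ k) (hklen : k < (xs.length : Int)) :
    PySem.List.pyGetD (PySem.List.pySetD xs i v) k d = if k = i then v else PySem.List.pyGetD xs k d := by
  rw [PySem.List.pySetD_of_nonneg xs v hi0,
      PySem.List.pyGetD_eq_getElem _ d hk0 (by simpa using hklen),
      PySem.List.pyGetD_eq_getElem _ d hk0 hklen,
      List.getElem_set]
  split_ifs <;> first | rfl | omega

theorem dqStep_inv (f : Int → Int) (w N c : Int) (st : List Int × List Int)
    (hw : 1 ≤ w) (hc0 : 0 ≤ c) (hcN : c < N) (h : DqInv f w N c st) :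
    DqInv f w N (c + 1) (dqStep f w st c) := by
  obtain ⟨hsort, hmem, hlen, hout⟩ := h
  have hpw : st.1.Pairwise (fun a b => f a ≤ f b) := by
    refine hsort.imp_of_mem ?_
    intro a b ha hb hab
    exact ((hmem a).mp ha).2.2.2 b hab ((hmem b).mp hb).2.2.1
  set dq1 := st.1.filter (fun i => decide (f i ≤ f c)) with hdq1
  have hmem1 : ∀ i, i ∈ dq1 ↔ (i ∈ st.1 ∧ f i ≤ f c) := by
    intro i; simp [hdq1, List.mem_filter]
  have hsort1 : dq1.Pairwise (· < ·) := hsort.filter _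
  set dq2 := dq1 ++ [c] with hdq2
  have hmemlt : ∀ i ∈ st.1, i < c := fun i hi => ((hmem i).mp hi).2.2.1
  have hsort2 : dq2.Pairwise (· < ·) := by
    rw [hdq2, List.pairwise_append]
    refine ⟨hsort1, List.pairwise_singleton _ _, ?_⟩
    intro a ha b hb
    rcases List.mem_singleton.mp hb with rfl
    exact hmemlt a ((hmem1 a).mp ha).1
  have hmem2 : ∀ i, i ∈ dq2 ↔
      (c - w ≤ i ∧ 0 ≤ i ∧ i < c + 1 ∧ ∀ j : Int, i < j → j < c + 1 → f i ≤ f j) := by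
    intro i
    rw [hdq2]
    simp only [List.mem_append, List.mem_singleton, hmem1 i, hmem i]
    constructor
    · rintro (⟨⟨h1, h2, h3, h4⟩, h5⟩ | rfl)
      · refine ⟨h1, h2, by omega, ?_⟩
        intro j hj1 hj2
        rcases lt_or_ge j c with hj | hj
        · exact h4 j hj1 hj
        · have : j = c := by omega
          subst this; exact h5
      · exact ⟨by omega, hc0, by omega, fun j hj1 hj2 => absurd hj1 (by omega)⟩
    · rintro ⟨h1, h2, h3, h4⟩
      rcases lt_or_eq_of_le (show i ≤ c by omega) with hic | rfl
      · exact Or.inl ⟨⟨h1, h2, hic, fun j hj1 hj2 => h4 j hj1 (by omega)⟩, h4 c hic (by omega)⟩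
      · exact Or.inr rfl
  have hne2 : dq2 ≠ [] := by simp [hdq2]
  obtain ⟨hd2, t2, he2⟩ := List.exists_cons_of_ne_nil hne2
  have hhd2min : ∀ i ∈ dq2, hd2 ≤ i := by
    intro i hi
    rw [he2] at hi hsort2
    rcases List.mem_cons.mp hi with rfl | hi
    · exact le_rfl
    · exact ((List.pairwise_cons.mp hsort2).1 i hi).le
  have hget2 : PySem.List.pyGetD dq2 0 0 = hd2 := by
    rw [he2]; exact PySem.List.pyGetD_zero_cons hd2 t2 0
  have hd2mem : hd2 ∈ dq2 := by rw [he2]; exact List.mem_cons_self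
  have hd2lb : c - w ≤ hd2 := ((hmem2 hd2).mp hd2mem).1
  set dq3 := if PySem.List.pyGetD dq2 0 0 ≤ c - w then dq2.tail else dq2 with hdq3
  have hsort3 : dq3.Pairwise (· < ·) := by
    rw [hdq3]; split
    · exact hsort2.sublist (List.tail_sublist _)
    · exact hsort2
  have hmem3 : ∀ i, i ∈ dq3 ↔
      (c + 1 - w ≤ i ∧ 0 ≤ i ∧ i < c + 1 ∧ ∀ j : Int, i < j → j < c + 1 → f i ≤ f j) := by
    intro i
    rw [hdq3]
    split_ifs with hcase
    · rw [hget2] at hcase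
      have hd2eq : hd2 = c - w := le_antisymm hcase hd2lb
      rw [he2]
      constructor
      · intro hi
        have hi2 : i ∈ dq2 := by rw [he2]; exact List.mem_cons_of_mem _ hi
        obtain ⟨h1, h2, h3, h4⟩ := (hmem2 i).mp hi2
        have hlt : hd2 < i := (List.pairwise_cons.mp (he2 ▸ hsort2)).1 i hi
        exact ⟨by omega, h2, h3, h4⟩
      · rintro ⟨h1, h2, h3, h4⟩
        have hi2 : i ∈ dq2 := (hmem2 i).mpr ⟨by omega, h2, h3, h4⟩
        rw [he2] at hi2
        rcases List.mem_cons.mp hi2 with rfl | hi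
        · omega
        · exact hi
    · rw [hget2] at hcase
      rw [hmem2 i]
      constructor
      · rintro ⟨h1, h2, h3, h4⟩
        have hle : hd2 ≤ i := hhd2min i ((hmem2 i).mpr ⟨h1, h2, h3, h4⟩)
        exact ⟨by omega, h2, h3, h4⟩
      · rintro ⟨h1, h2, h3, h4⟩
        exact ⟨by omega, h2, h3, h4⟩
  have hcmem3 : c ∈ dq3 :=
    (hmem3 c).mpr ⟨by omega, hc0, by omega, fun j hj1 hj2 => absurd hj1 (by omega)⟩
  obtain ⟨hd3, t3, he3⟩ := List.exists_cons_of_ne_nil (List.ne_nil_of_mem hcmem3)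
  have hget3 : PySem.List.pyGetD dq3 0 0 = hd3 := by
    rw [he3]; exact PySem.List.pyGetD_zero_cons hd3 t3 0
  have hd3mem : hd3 ∈ dq3 := by rw [he3]; exact List.mem_cons_self
  have hhd3min : ∀ i ∈ dq3, hd3 ≤ i := by
    intro i hi
    rw [he3] at hi hsort3
    rcases List.mem_cons.mp hi with rfl | hi
    · exact le_rfl
    · exact ((List.pairwise_cons.mp hsort3).1 i hi).le
  obtain ⟨hp1, hp2, hp3, hp4⟩ := (hmem3 hd3).mp hd3mem
  have hmin : ∀ d : ℕ, ∀ i : Int, c + 1 - w ≤ i → 0 ≤ i → i ≤ c → (c - i).toNat ≤ d →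
      f hd3 ≤ f i := by
    intro d
    induction d with
    | zero =>
      intro i h1 h0 h2 h3
      have hic : i = c := by omega
      subst hic
      rcases lt_or_eq_of_le (hhd3min i hcmem3) with hlt | heq
      · exact hp4 i hlt (by omega)
      · rw [← heq]
    | succ d ih =>
      intro i h1 h0 h2 h3
      rcases lt_or_ge i hd3 with hlt | hge
      · have hni : i ∉ dq3 := fun hi => absurd (hhd3min i hi) (by omega)
        have hex : ∃ j : Int, i < j ∧ j < c + 1 ∧ f j < f i := by
          by_contra hno
          push Not at hno
          exact hni ((hmem3 i).mpr ⟨h1, h0, by omega, fun j hj1 hj2 => hno j hj1 hj2⟩)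
        obtain ⟨j, hj1, hj2, hj3⟩ := hex
        have hj : f hd3 ≤ f j := ih j (by omega) (by omega) (by omega) (by omega)
        omega
      · rcases lt_or_eq_of_le hge with hlt2 | heq
        · exact hp4 i hlt2 (by omega)
        · rw [← heq]
  have hstep : dqStep f w st c =
      (dq3, if c ≥ w - 1 then PySem.List.pySetD st.2 (c - w + 1) (f (PySem.List.pyGetD dq3 0 0)) else st.2) := by
    simp only [dqStep]
    rw [popBack_filter f (f c) st.1 hpw]
  rw [hstep]
  refine ⟨hsort3, hmem3, ?_, ?_⟩
  · split_ifs with hcw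
    · rw [PySem.List.length_pySetD]; exact hlen
    · exact hlen
  · intro k hk0 hk
    split_ifs with hcw
    · rw [hget3]
      have hidx0 : (0 : Int) ≤ c - w + 1 := by omega
      rw [pyGetD_pySetD_int st.2 (c - w + 1) k (f hd3) 0 hidx0 hk0 (by rw [hlen]; omega)]
      split_ifs with hkeq
      · subst hkeq
        apply le_antisymm
        · refine le_winMin f (c - w + 1) w _ hw ?_
          intro i hi1 hi2
          exact hmin (c - i).toNat i (by omega) (by omega) (by omega) le_rfl
        · exact winMin_le f (c - w + 1) w hd3 (by omega) (by omega)
      · exact hout k hk0 (by omega)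
    · have : (1 : Int) ≤ 0 := by omega
      omega
  

theorem dqPass_inv (f : Int → Int) (w N : Int) (hw : 1 ≤ w) :
    ∀ a : Int, 0 ≤ a → a ≤ N → ∀ st, DqInv f w N a st →
      DqInv f w N N ((PySem.List.pyRange a N 1).foldl (dqStep f w) st) := by
  have main : ∀ d : ℕ, ∀ a : Int, ∀ st, 0 ≤ a → a ≤ N → (N - a).toNat = d → DqInv f w N a st →
      DqInv f w N N ((PySem.List.pyRange a N 1).foldl (dqStep f w) st) := by
    intro d
    induction d with
    | zero =>
      intro a st ha haN hd hInv
      have : a = N := by omega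
      subst this
      rw [PySem.List.pyRange_one_eq_nil le_rfl]
      exact hInv
    | succ d ih =>
      intro a st ha haN hd hInv
      have hlt : a < N := by omega
      rw [PySem.List.pyRange_one_cons hlt, List.foldl_cons]
      exact ih (a + 1) _ (by omega) (by omega) (by omega) (dqStep_inv f w N a st hw ha hlt hInv)
  intro a ha haN st hInv
  exact main (N - a).toNat a st ha haN rfl hInv

theorem dqPass_spec (f : Int → Int) (w N k : Int) (hw : 1 ≤ w) (hk0 : 0 ≤ k) (hk : k ≤ N - w) :
    PySem.List.pyGetD (dqPass f w N) k 0 = winMin f k w := by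
  have hInv0 : DqInv f w N 0 ([], PySem.List.pyRepeat [(0:Int)] (N - w + 1)) := by
    refine ⟨List.Pairwise.nil, ?_, ?_, ?_⟩
    · intro i; simp only [List.not_mem_nil, false_iff]; omega
    · rw [PySem.List.pyRepeat_singleton]; simp
    · intro k hk0 hk; omega
  have hfin := dqPass_inv f w N hw 0 le_rfl (by omega) _ hInv0
  exact hfin.2.2.2 k hk0 hk

theorem scan_congr (R C : List Int) (F G : Int → Int → Int) (init : Int × List Int)
    (hfg : ∀ r ∈ R, ∀ c ∈ C, F r c = G r c) :
    R.foldl (fun st r => C.foldl (fun (st : Int × List Int) c =>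
        if F r c > st.1 then (F r c, [r, c]) else st) st) init
    = R.foldl (fun st r => C.foldl (fun (st : Int × List Int) c =>
        if G r c > st.1 then (G r c, [r, c]) else st) st) init := by
  apply PySem.List.foldl_congr_mem
  intro acc r hr
  apply PySem.List.foldl_congr_mem
  intro acc' c hc
  rw [hfg r hr c hc]

theorem foldl_if_lt_eq_min (F : Int → Int) (l : List Int) (v : Int) :
    l.foldl (fun v x => if F x < v then F x else v) v = (l.map F).foldl min v := by
  induction l generalizing v with
  | nil => rfl
  | cons x t ih =>
    simp only [List.foldl_cons, List.map_cons, ih]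
    congr 1
    rw [min_def]
    split_ifs <;> omega

theorem foldl_foldl_min_flat (Lj : Int → List Int) (l : List Int) (v : Int) :
    l.foldl (fun v i => (Lj i).foldl min v) v = (l.flatMap Lj).foldl min v := by
  induction l generalizing v with
  | nil => rfl
  | cons x t ih => simp [List.foldl_append, ih]

theorem block_eq (f : Int → Int → Int) (r c hh ww : Int) (h1 : 1 ≤ hh) (h2 : 1 ≤ ww) :
    winMin (fun i => winMin (f i) c ww) r hh
    = ((PySem.List.pyRange r (r + hh) 1).flatMap
        (fun i => (PySem.List.pyRange c (c + ww) 1).map (f i))).foldl min (f r c) := by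
  have hatom : ∀ i j : Int, r ≤ i → i < r + hh → c ≤ j → j < c + ww →
      ((PySem.List.pyRange r (r + hh) 1).flatMap
        (fun i => (PySem.List.pyRange c (c + ww) 1).map (f i))).foldl min (f r c) ≤ f i j := by
    intro i j hi1 hi2 hj1 hj2
    exact (PySem.List.foldl_min_le _ _).2 _ (List.mem_flatMap.mpr
      ⟨i, PySem.List.mem_pyRange_one.mpr ⟨hi1, hi2⟩,
        List.mem_map.mpr ⟨j, PySem.List.mem_pyRange_one.mpr ⟨hj1, hj2⟩, rfl⟩⟩)
  apply le_antisymm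
  · rcases PySem.List.foldl_min_mem ((PySem.List.pyRange r (r + hh) 1).flatMap
        (fun i => (PySem.List.pyRange c (c + ww) 1).map (f i))) (f r c) with he | he
    · rw [he]
      exact le_trans (winMin_le _ r hh r le_rfl (by omega)) (winMin_le _ c ww c le_rfl (by omega))
    · rcases List.mem_flatMap.mp he with ⟨i, hi, hmem⟩
      rcases List.mem_map.mp hmem with ⟨j, hj, hfij⟩
      rcases PySem.List.mem_pyRange_one.mp hi with ⟨hi1, hi2⟩
      rcases PySem.List.mem_pyRange_one.mp hj with ⟨hj1, hj2⟩
      rw [← hfij]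
      exact le_trans (winMin_le _ r hh i hi1 hi2) (winMin_le _ c ww j hj1 hj2)
  · have houter : ∀ i : Int, r ≤ i → i < r + hh →
        ((PySem.List.pyRange r (r + hh) 1).flatMap
          (fun i => (PySem.List.pyRange c (c + ww) 1).map (f i))).foldl min (f r c)
        ≤ winMin (f i) c ww := by
      intro i hi1 hi2
      rcases winMin_attained (f i) c ww with he | ⟨j, hj1, hj2, he⟩
      · rw [he]; exact hatom i c hi1 hi2 le_rfl (by omega)
      · rw [he]; exact hatom i j hi1 hi2 hj1 hj2
    rcases winMin_attained (fun i => winMin (f i) c ww) r hh with he | ⟨i, hi1, hi2, he⟩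
    · rw [he]; exact houter r le_rfl (by omega)
    · rw [he]; exact houter i hi1 hi2

-- ===== VERDICT (by name: the statement is the Claim_ definition above) =====
theorem solution_spec : Claim_equal_solution := by
  intro m n h_ w drops hDom hPre
  obtain ⟨-, -, -, hdisj⟩ := hPre
  by_cases hhw : 1 ≤ h_ ∧ 1 ≤ w
  case neg =>
    -- the scan ranges are empty: both programs return the initial answer [0, 0]
    have hdeg : m - h_ + 1 ≤ 0 ∨ n - w + 1 ≤ 0 := by tauto
    unfold Spec_solution solution solution_alt
    rcases hdeg with hm | hn
    · rw [PySem.List.pyRange_one_eq_nil (show m - h_ + 1 ≤ 0 from hm)]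
      rfl
    · rw [PySem.List.pyRange_one_eq_nil (show n - w + 1 ≤ 0 from hn)]
      simp only [List.foldl_nil]
  obtain ⟨hh, hw⟩ := hhw
  unfold Spec_solution solution solution_alt
  set rain := buildRain m n drops with hrain
  set rowMin := (PySem.List.pyRange 0 m 1).map (fun r => dqPass (fun c => gget rain r c) w n) with hrm
  set areaCols := (PySem.List.pyRange 0 (n - w + 1) 1).map (fun c => dqPass (fun r => gget rowMin r c) h_ m) with hac
  refine congrArg Prod.snd (scan_congr _ _ _ _ _ ?_)
  intro r hr c hc
  obtain ⟨hr0, hr1⟩ := PySem.List.mem_pyRange_one.mp hr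
  obtain ⟨hc0, hc1⟩ := PySem.List.mem_pyRange_one.mp hc
  have e1 : PySem.List.pyGetD areaCols c [] = dqPass (fun i => gget rowMin i c) h_ m :=
    PySem.List.pyGetD_map_pyRange_of_nonneg _ _ _ _ hc0 (by omega)
  have e2 : gget areaCols c r = winMin (fun i => gget rowMin i c) r h_ := by
    show PySem.List.pyGetD (PySem.List.pyGetD areaCols c []) r 0 = _
    rw [e1]
    exact dqPass_spec _ h_ m r hh hr0 (by omega)
  have e3 : ∀ i, r ≤ i → i < r + h_ → gget rowMin i c = winMin (fun j => gget rain i j) c w := by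
    intro i hi1 hi2
    show PySem.List.pyGetD (PySem.List.pyGetD rowMin i []) c 0 = _
    rw [hrm, PySem.List.pyGetD_map_pyRange_of_nonneg _ _ _ _ (by omega) (by omega)]
    exact dqPass_spec _ w n c hw hc0 (by omega)
  rw [e2,
    winMin_congr (fun i => gget rowMin i c) (fun i => winMin (fun j => gget rain i j) c w) r h_ hh e3,
    block_eq (fun i j => gget rain i j) r c h_ w hh hw, ← foldl_foldl_min_flat]
  apply PySem.List.foldl_congr_mem
  intro acc i _
  exact (foldl_if_lt_eq_min (fun j => gget rain i j) _ acc).symm
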